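-- pv_equiv track=rewrite | github.com/Kazun1998/library_for_python | Integer/Quotient_Reminder.py | Quotient_Range
-- ===== SOURCE A (Python) =====
-- def Quotient_Range(N):
--     """ N で割った商の可能性を全て列挙する.
--
--     [Input]
--     N: 正整数
--
--     [Output]
--     X: リスト
--     Xの各要素 (t, x, y) は x <= k <= y であることと, floor(N/k) = t が同値であることを表す.
--
--     [Note]
--     各 (t, x, y) に対して, x <= k <= y の範囲において, N mod k は等差数列になる.
--     """
--     X = []
--
--     # Step 1: k<=sqrt(N) の範囲について k を全探索する.
--     k = 1
--     while k * k <= N: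
--         X.append((N//k, k, k))
--         k += 1
--
--     # Step 2: t<=sqrt(N) の範囲において, floor(N/k)=t を満たす k の範囲を求める.
--     for t in range(k, 0, -1):
--         l = N//(t + 1) + 1
--         r = N//t
--
--         if (l <= r) and (X[-1][1] < l):
--             X.append((t, l, r))
--
--     return X
-- ===== SOURCE B (Python) =====
-- def Quotient_Range(N):
--     """Single forward block-walk: k jumps from one quotient block to the next."""
--     X = []
--     k = 1
--     while k <= N:
--         t = N // k
--         r = N // t
--         X.append((t, k, r))
--         k = r + 1
--     return X
-- ===== Notes on version B (the rewrite author's own statement) =====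
-- stated objective: simpler
-- what changed: Replaced A's two-phase construction (ascending small-k exhaustive loop plus a descending-t range loop with an append guard reading X[-1]) by a single forward block-walk that jumps k to N//(N//k)+1, emitting each quotient block in one unified pass.
import Mathlib
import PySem

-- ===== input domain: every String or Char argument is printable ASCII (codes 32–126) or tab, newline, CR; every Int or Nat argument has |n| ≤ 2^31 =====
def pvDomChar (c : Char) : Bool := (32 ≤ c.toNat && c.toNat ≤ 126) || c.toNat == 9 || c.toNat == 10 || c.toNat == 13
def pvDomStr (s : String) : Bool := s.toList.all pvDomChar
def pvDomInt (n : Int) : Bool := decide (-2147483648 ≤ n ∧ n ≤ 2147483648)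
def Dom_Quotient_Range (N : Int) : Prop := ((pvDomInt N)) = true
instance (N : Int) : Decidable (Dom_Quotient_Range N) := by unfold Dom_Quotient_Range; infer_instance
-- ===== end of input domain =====

-- B replaces A's two-phase enumeration (small-k loop, then descending-t loop) by one forward block-walk; same O(√N) cost, one simpler pass.

-- ===== PORT A =====
-- Step 1 while-loop; fuel only makes the recursion total (never exhausted when called with fuel N.toNat+1 from k=1).
def QR_loop1 (N : Int) (fuel : Nat) (k : Int) (X : List (Int × Int × Int)) :
    List (Int × Int × Int) × Int :=
  match fuel with
  | 0 => (X, k)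
  | fuel + 1 =>
    if k * k ≤ N then
      QR_loop1 N fuel (k + 1) (X ++ [(PySem.Int.floordiv N k, k, k)])
    else (X, k)

-- Step 2 body; the `none` arm is where Python's X[-1] would raise IndexError (unreachable: whenever step 2 runs, l > r or X ≠ []).
def QR_step2 (N : Int) (X : List (Int × Int × Int)) (t : Int) : List (Int × Int × Int) :=
  let l := PySem.Int.floordiv N (t + 1) + 1
  let r := PySem.Int.floordiv N t
  if l ≤ r then
    match PySem.List.pyGet? X (-1) with
    | some e => if e.2.1 < l then X ++ [(t, l, r)] else X
    | none => X
  else X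

def Quotient_Range (N : Int) : List (Int × Int × Int) :=
  let p := QR_loop1 N (N.toNat + 1) 1 []
  (PySem.List.pyRange p.2 0 (-1)).foldl (QR_step2 N) p.1

-- ===== PORT B =====
-- single forward block-walk (Source B); fuel only makes the recursion total (never exhausted with fuel N.toNat+1 from k=1).
def QRB_loop (N : Int) (fuel : Nat) (k : Int) (X : List (Int × Int × Int)) :
    List (Int × Int × Int) :=
  match fuel with
  | 0 => X
  | fuel + 1 =>
    if k ≤ N then
      let t := PySem.Int.floordiv N k
      let r := PySem.Int.floordiv N t
      QRB_loop N fuel (r + 1) (X ++ [(t, k, r)])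
    else X

def Quotient_Range_alt (N : Int) : List (Int × Int × Int) :=
  QRB_loop N (N.toNat + 1) 1 []

-- ===== PRECONDITION & SPEC =====
def Spec_Quotient_Range (N : Int) (out : List (Int × Int × Int)) : Prop := out = Quotient_Range_alt N
instance (N : Int) (out : List (Int × Int × Int)) : Decidable (Spec_Quotient_Range N out) := by unfold Spec_Quotient_Range; infer_instance

-- ===== CLAIM (what is proved, stated in full; the proofs are below) =====
def Claim_equal_Quotient_Range : Prop := ∀ (N : Int), Dom_Quotient_Range N → Spec_Quotient_Range N (Quotient_Range N)

-- ===== LEMMAS AND PROOFS =====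

-- m = ⌊√N⌋ and T = N // (m+1): the singleton phase covers k ∈ [1,m], the wide-block phase t ∈ [1,T].
def qrM (N : Int) : Int := (Nat.sqrt N.toNat : Int)
def qrT (N : Int) : Int := PySem.Int.floordiv N (qrM N + 1)

-- c singleton blocks starting at k
def qrSingles (N : Int) : Nat → Int → List (Int × Int × Int)
  | 0, _ => []
  | c + 1, k => (PySem.Int.floordiv N k, k, k) :: qrSingles N c (k + 1)

-- c wide blocks for t, t-1, …
def qrBlocksAux (N : Int) : Nat → Int → List (Int × Int × Int)
  | 0, _ => []
  | c + 1, t => (t, PySem.Int.floordiv N (t + 1) + 1, PySem.Int.floordiv N t) :: qrBlocksAux N c (t - 1)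

def qrBlocks (N t : Int) : List (Int × Int × Int) := qrBlocksAux N t.toNat t

def qrDescAux : Nat → Int → List Int
  | 0, _ => []
  | c + 1, t => t :: qrDescAux c (t - 1)

def qrDesc (t : Int) : List Int := qrDescAux t.toNat t

lemma qrBlocks_cons (N t : Int) (ht : 1 ≤ t) :
    qrBlocks N t = (t, PySem.Int.floordiv N (t + 1) + 1, PySem.Int.floordiv N t) :: qrBlocks N (t - 1) := by
  have h : t.toNat = (t - 1).toNat + 1 := by omega
  rw [qrBlocks, h, qrBlocksAux, qrBlocks]

lemma qrBlocks_zero (N t : Int) (ht : t ≤ 0) : qrBlocks N t = [] := by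
  have h : t.toNat = 0 := by omega
  rw [qrBlocks, h, qrBlocksAux]

lemma qrDesc_cons (t : Int) (ht : 1 ≤ t) : qrDesc t = t :: qrDesc (t - 1) := by
  have h : t.toNat = (t - 1).toNat + 1 := by omega
  rw [qrDesc, h, qrDescAux, qrDesc]

lemma qrDesc_zero (t : Int) (ht : t ≤ 0) : qrDesc t = [] := by
  have h : t.toNat = 0 := by omega
  rw [qrDesc, h, qrDescAux]

lemma qrSingles_snoc (N : Int) : ∀ (c : Nat) (k : Int),
    qrSingles N (c + 1) k = qrSingles N c k ++ [(PySem.Int.floordiv N (k + (c : Int)), k + (c : Int), k + (c : Int))] := by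
  intro c
  induction c with
  | zero => intro k; simp [qrSingles]
  | succ c ih =>
    intro k
    have h : k + 1 + (c : Int) = k + ((c + 1 : Nat) : Int) := by push_cast; ring
    show (PySem.Int.floordiv N k, k, k) :: qrSingles N (c + 1) (k + 1) = _
    rw [ih (k + 1), h]
    rfl

lemma qrDescAux_snoc : ∀ (c : Nat) (t : Int),
    qrDescAux (c + 1) t = qrDescAux c t ++ [t - (c : Int)] := by
  intro c
  induction c with
  | zero => intro t; simp [qrDescAux]
  | succ c ih =>
    intro t
    have h : t - 1 - (c : Int) = t - ((c + 1 : Nat) : Int) := by push_cast; ring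
    show t :: qrDescAux (c + 1) (t - 1) = _
    rw [ih (t - 1), h]
    rfl

lemma range_map_desc : ∀ (c : Nat) (a : Int),
    (List.range c).map (fun (k : Nat) => a + -1 * (k : Int)) = qrDescAux c a := by
  intro c
  induction c with
  | zero => intro a; simp [qrDescAux]
  | succ c ih =>
    intro a
    rw [List.range_succ, List.map_append, ih]
    simp only [List.map_cons, List.map_nil]
    rw [qrDescAux_snoc, show a + -1 * (c : Int) = a - (c : Int) from by ring]

lemma pyRange_desc (a : Int) (ha : 0 ≤ a) :
    PySem.List.pyRange a 0 (-1) = qrDesc a := by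
  rw [qrDesc, ← range_map_desc a.toNat a]
  simp only [PySem.List.pyRange]
  norm_num
  rcases (by omega : 0 < a ∨ a = 0) with h | h
  · rw [if_pos h]
  · subst h
    norm_num

-- stop forms of the two loops
lemma QR_loop1_stop (N : Int) (fuel : Nat) (k : Int) (X : List (Int × Int × Int))
    (h : ¬ k * k ≤ N) : QR_loop1 N fuel k X = (X, k) := by
  cases fuel <;> simp [QR_loop1, h]

lemma QRB_loop_stop (N : Int) (fuel : Nat) (k : Int) (X : List (Int × Int × Int))
    (h : ¬ k ≤ N) : QRB_loop N fuel k X = X := by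
  cases fuel <;> simp [QRB_loop, h]

-- floordiv basics
lemma fd_nonneg (N b : Int) (hN : 0 ≤ N) (hb : 0 < b) : 0 ≤ PySem.Int.floordiv N b := by
  rw [PySem.Int.le_floordiv_iff_mul_le hb]
  simpa using hN

lemma fd_le (N b : Int) (hN : 0 ≤ N) (hb : 0 < b) : PySem.Int.floordiv N b ≤ N := by
  have h : PySem.Int.floordiv N b < N + 1 := by
    rw [PySem.Int.floordiv_lt_iff_lt_mul hb]
    nlinarith
  omega

lemma fd_one (N : Int) : PySem.Int.floordiv N 1 = N := by
  rw [PySem.Int.floordiv_eq_iff_of_pos (by norm_num)]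
  omega

-- m*m ≤ N < (m+1)*(m+1)
lemma qrM_sq (N : Int) (hN : 0 ≤ N) :
    qrM N * qrM N ≤ N ∧ N < (qrM N + 1) * (qrM N + 1) := by
  have h1 : Nat.sqrt N.toNat * Nat.sqrt N.toNat ≤ N.toNat := by
    simpa [pow_two] using Nat.sqrt_le' N.toNat
  have h2 : N.toNat < (Nat.sqrt N.toNat + 1) * (Nat.sqrt N.toNat + 1) := by
    simpa [pow_two, Nat.succ_eq_add_one] using Nat.lt_succ_sqrt' N.toNat
  unfold qrM
  constructor
  · exact le_trans (by exact_mod_cast h1) (by omega : ((N.toNat : Int)) ≤ N)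
  · have he : N = (N.toNat : Int) := by omega
    rw [he]
    exact_mod_cast h2

lemma qrM_pos (N : Int) (hN : 1 ≤ N) : 1 ≤ qrM N := by
  have h := qrM_sq N (by omega)
  by_contra h'
  have h0 : 0 ≤ qrM N := by unfold qrM; positivity
  have hz : qrM N = 0 := by omega
  rw [hz] at h
  omega

lemma qrM_le (N : Int) (hN : 1 ≤ N) : qrM N ≤ N := by
  have h := qrM_sq N (by omega)
  have h1 := qrM_pos N hN
  nlinarith

-- N // (N // k) = k for 1 ≤ k with k² ≤ N
lemma fd_fd_self (N k : Int) (hk : 1 ≤ k) (hsq : k * k ≤ N) :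
    PySem.Int.floordiv N (PySem.Int.floordiv N k) = k := by
  set t := PySem.Int.floordiv N k with hT
  have htk : k ≤ t := by rw [hT, PySem.Int.le_floordiv_iff_mul_le (by omega)]; linarith
  have hchar := (PySem.Int.floordiv_eq_iff_of_pos (a := N) (b := k) (q := t) (by omega)).mp hT.symm
  rw [PySem.Int.floordiv_eq_iff_of_pos (by omega : (0:Int) < t)]
  constructor
  · nlinarith [hchar.1]
  · nlinarith [hchar.2]

-- block t nonempty: N//(t+1)+1 ≤ N//t when t(t+1) ≤ N
lemma fd_block_nonempty (N t : Int) (ht : 1 ≤ t) (h : t * (t + 1) ≤ N) :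
    PySem.Int.floordiv N (t + 1) + 1 ≤ PySem.Int.floordiv N t := by
  set q := PySem.Int.floordiv N (t + 1) with hq
  have hqt : t ≤ q := by rw [hq, PySem.Int.le_floordiv_iff_mul_le (by omega)]; linarith
  have hchar := (PySem.Int.floordiv_eq_iff_of_pos (a := N) (b := t + 1) (q := q) (by omega)).mp hq.symm
  rw [PySem.Int.le_floordiv_iff_mul_le (by omega)]
  nlinarith [hchar.1]

-- block consistency: if l = N//(t+1)+1 ≤ N//t then N//l = t
lemma fd_block (N t : Int) (hN : 1 ≤ N) (ht : 1 ≤ t)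
    (h : PySem.Int.floordiv N (t + 1) + 1 ≤ PySem.Int.floordiv N t) :
    PySem.Int.floordiv N (PySem.Int.floordiv N (t + 1) + 1) = t := by
  set q := PySem.Int.floordiv N (t + 1) with hq
  have hq0 : 0 ≤ q := fd_nonneg N (t + 1) (by omega) (by omega)
  have hchar := (PySem.Int.floordiv_eq_iff_of_pos (a := N) (b := t + 1) (q := q) (by omega)).mp hq.symm
  have hr := (PySem.Int.le_floordiv_iff_mul_le (a := N) (b := t) (q := q + 1) (by omega)).mp h
  rw [PySem.Int.floordiv_eq_iff_of_pos (by omega : (0:Int) < q + 1)]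
  constructor
  · nlinarith
  · nlinarith [hchar.2]

lemma qrT_le_M (N : Int) (hN : 1 ≤ N) : qrT N ≤ qrM N := by
  have h := qrM_sq N (by omega)
  have hm := qrM_pos N hN
  have hlt : PySem.Int.floordiv N (qrM N + 1) < qrM N + 1 := by
    rw [PySem.Int.floordiv_lt_iff_lt_mul (by omega)]
    exact h.2
  unfold qrT
  omega

lemma qrT_ge (N : Int) (hN : 1 ≤ N) : qrM N - 1 ≤ qrT N := by
  have h := qrM_sq N (by omega)
  have hm := qrM_pos N hN
  unfold qrT
  rw [PySem.Int.le_floordiv_iff_mul_le (by omega)]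
  nlinarith

lemma qrT_nonneg (N : Int) (hN : 1 ≤ N) : 0 ≤ qrT N :=
  fd_nonneg N _ (by omega) (by have := qrM_pos N hN; omega)

-- junction: N // (T+1) = m
lemma fd_T_succ (N : Int) (hN : 1 ≤ N) :
    PySem.Int.floordiv N (qrT N + 1) = qrM N := by
  have h := qrM_sq N (by omega)
  have hm := qrM_pos N hN
  have hTm := qrT_le_M N hN
  have hT0 := qrT_nonneg N hN
  have hchar := (PySem.Int.floordiv_eq_iff_of_pos (a := N) (b := qrM N + 1) (q := qrT N) (by omega)).mp rfl
  rw [PySem.Int.floordiv_eq_iff_of_pos (by omega : (0:Int) < qrT N + 1)]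
  constructor
  · rcases eq_or_lt_of_le hTm with hEq | hLt
    · nlinarith [hchar.1]
    · nlinarith [h.1]
  · nlinarith [hchar.2]

lemma qrT_pos (N : Int) (hN : 2 ≤ N) : 1 ≤ qrT N := by
  have h := qrM_sq N (by omega)
  have hm := qrM_pos N (by omega)
  unfold qrT
  rw [PySem.Int.le_floordiv_iff_mul_le (by omega)]
  nlinarith

lemma qrT_mul_le (N t : Int) (hN : 1 ≤ N) (ht : t ≤ qrT N) (ht1 : 1 ≤ t) :
    t * (t + 1) ≤ N := by
  have hm := qrM_pos N hN
  have hTm := qrT_le_M N hN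
  have hmul : t * (qrM N + 1) ≤ N :=
    (PySem.Int.le_floordiv_iff_mul_le (a := N) (b := qrM N + 1) (q := t) (by omega)).mp ht
  nlinarith

-- ===== closed form of A's step-1 loop =====
lemma run1 (N : Int) (hN : 1 ≤ N) :
    ∀ (c : Nat) (fuel : Nat) (k : Int) (X : List (Int × Int × Int)),
      1 ≤ k → k + (c : Int) = qrM N + 1 → c ≤ fuel →
      QR_loop1 N fuel k X = (X ++ qrSingles N c k, qrM N + 1) := by
  intro c
  induction c with
  | zero =>
    intro fuel k X hk hkc _
    have hsq := qrM_sq N (by omega)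
    have hkm : k = qrM N + 1 := by push_cast at hkc; omega
    have hguard : ¬ k * k ≤ N := by rw [hkm]; exact not_le.mpr hsq.2
    rw [QR_loop1_stop N fuel k X hguard]
    simp [qrSingles, hkm]
  | succ c ih =>
    intro fuel k X hk hkc hfuel
    have hsq := qrM_sq N (by omega)
    have hkm : k ≤ qrM N := by push_cast at hkc; omega
    have hguard : k * k ≤ N := by nlinarith [hsq.1]
    match fuel with
    | 0 => omega
    | fuel + 1 =>
      simp only [QR_loop1, if_pos hguard]
      rw [ih fuel (k + 1) _ (by omega) (by push_cast at hkc ⊢; omega) (by omega)]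
      simp [qrSingles]

-- ===== closed form of A's step-2 fold, from t = tc down to 1, tc ≤ T =====
lemma run2 (N : Int) (hN : 1 ≤ N) :
    ∀ (tc : Nat) (Y : List (Int × Int × Int)) (e : Int × Int × Int),
      (tc : Int) ≤ qrT N → e.2.1 ≤ PySem.Int.floordiv N ((tc : Int) + 1) →
      (qrDesc (tc : Int)).foldl (QR_step2 N) (Y ++ [e]) = (Y ++ [e]) ++ qrBlocks N (tc : Int) := by
  intro tc
  induction tc with
  | zero =>
    intro Y e _ _
    rw [show (((0:Nat)):Int) = 0 by norm_num, qrDesc_zero 0 (by norm_num), qrBlocks_zero N 0 (by norm_num)]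
    simp
  | succ tc ih =>
    intro Y e htc he
    push_cast at htc he ⊢
    set t : Int := (tc : Int) + 1 with hts
    have ht1 : 1 ≤ t := by omega
    have hne : PySem.Int.floordiv N (t + 1) + 1 ≤ PySem.Int.floordiv N t :=
      fd_block_nonempty N t ht1 (qrT_mul_le N t hN htc ht1)
    rw [qrDesc_cons t ht1, qrBlocks_cons N t ht1]
    simp only [List.foldl_cons]
    have hstep : QR_step2 N (Y ++ [e]) t =
        (Y ++ [e]) ++ [(t, PySem.Int.floordiv N (t + 1) + 1, PySem.Int.floordiv N t)] := by
      unfold QR_step2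
      simp only [PySem.List.pyGet?_neg_one_append_singleton]
      rw [if_pos hne, if_pos (by omega)]
    rw [hstep]
    have ht1' : t - 1 = (tc : Int) := by omega
    have hrec := ih (Y ++ [e]) (t, PySem.Int.floordiv N (t + 1) + 1, PySem.Int.floordiv N t)
      (by omega) (by simpa [ht1'] using hne)
    rw [ht1', hrec]
    simp

-- ===== closed form of B's loop: wide-block phase =====
lemma runB2 (N : Int) (hN : 1 ≤ N) :
    ∀ (tc : Nat) (fuel : Nat) (X : List (Int × Int × Int)),
      (tc : Int) ≤ qrT N → tc < fuel →
      QRB_loop N fuel (PySem.Int.floordiv N ((tc : Int) + 1) + 1) X = X ++ qrBlocks N (tc : Int) := by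
  intro tc
  induction tc with
  | zero =>
    intro fuel X _ hfuel
    rw [show (((0:Nat)):Int) = 0 by norm_num]
    rw [show PySem.Int.floordiv N ((0:Int) + 1) + 1 = N + 1 by norm_num [fd_one]]
    rw [QRB_loop_stop N fuel (N + 1) X (by omega)]
    rw [qrBlocks_zero N 0 (by norm_num)]
    simp
  | succ tc ih =>
    intro fuel X htc hfuel
    push_cast at htc ⊢
    set t : Int := (tc : Int) + 1 with hts
    have ht1 : 1 ≤ t := by omega
    have hne : PySem.Int.floordiv N (t + 1) + 1 ≤ PySem.Int.floordiv N t :=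
      fd_block_nonempty N t ht1 (qrT_mul_le N t hN htc ht1)
    have hblk : PySem.Int.floordiv N (PySem.Int.floordiv N (t + 1) + 1) = t :=
      fd_block N t hN ht1 hne
    have hkN : PySem.Int.floordiv N (t + 1) + 1 ≤ N := by
      have := fd_le N t (by omega) (by omega)
      omega
    match fuel with
    | 0 => omega
    | fuel + 1 =>
      simp only [QRB_loop, if_pos hkN, hblk]
      have ht1' : t - 1 = (tc : Int) := by omega
      have hrec := ih fuel (X ++ [(t, PySem.Int.floordiv N (t + 1) + 1, PySem.Int.floordiv N t)])
        (by omega) (by omega)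
      rw [hrec, qrBlocks_cons N t ht1, ht1']
      simp

-- ===== closed form of B's loop: singleton phase then wide blocks =====
lemma runB1 (N : Int) (hN : 2 ≤ N) :
    ∀ (c : Nat) (fuel : Nat) (k : Int) (X : List (Int × Int × Int)),
      1 ≤ k → k + (c : Int) = qrM N + 1 → c + (qrT N).toNat < fuel →
      QRB_loop N fuel k X = X ++ qrSingles N c k ++ qrBlocks N (qrT N) := by
  intro c
  induction c with
  | zero =>
    intro fuel k X hk hkc hfuel
    have hT1 := qrT_pos N hN
    have hTj := fd_T_succ N (by omega)
    have hcast : (((qrT N).toNat : Int)) = qrT N := by omega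
    have hk' : k = PySem.Int.floordiv N (((qrT N).toNat : Int) + 1) + 1 := by
      rw [hcast, hTj]; push_cast at hkc; omega
    rw [hk', runB2 N (by omega) (qrT N).toNat fuel X (by omega) (by omega), hcast]
    simp [qrSingles]
  | succ c ih =>
    intro fuel k X hk hkc hfuel
    have hsq := qrM_sq N (by omega)
    have hkm : k ≤ qrM N := by push_cast at hkc; omega
    have hguard : k * k ≤ N := by nlinarith [hsq.1]
    have hkN : k ≤ N := by nlinarith [qrM_le N (by omega)]
    have hfd := fd_fd_self N k hk hguard
    match fuel with
    | 0 => omega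
    | fuel + 1 =>
      simp only [QRB_loop, if_pos hkN, hfd]
      rw [ih fuel (k + 1) _ (by omega) (by push_cast at hkc ⊢; omega) (by omega)]
      simp [qrSingles]

-- the last singleton has x-component m
lemma qrSingles_split (N : Int) (hN : 1 ≤ N) :
    qrSingles N (qrM N).toNat 1 =
      qrSingles N ((qrM N).toNat - 1) 1 ++ [(PySem.Int.floordiv N (qrM N), qrM N, qrM N)] := by
  have hm := qrM_pos N hN
  have h2 : (1 : Int) + ((((qrM N).toNat - 1) : Nat) : Int) = qrM N := by omega
  calc qrSingles N (qrM N).toNat 1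
      = qrSingles N (((qrM N).toNat - 1) + 1) 1 := by
        rw [show (qrM N).toNat - 1 + 1 = (qrM N).toNat from by omega]
    _ = _ := by rw [qrSingles_snoc, h2]

-- the N ≤ 0 case: both return []
lemma main_nonpos (N : Int) (hN : N ≤ 0) : Quotient_Range N = Quotient_Range_alt N := by
  simp only [Quotient_Range, Quotient_Range_alt]
  rw [QR_loop1_stop N _ 1 [] (by simpa using (by omega : ¬ (1:Int) ≤ N)),
      QRB_loop_stop N _ 1 [] (by omega)]
  rw [show PySem.List.pyRange ((([] : List (Int×Int×Int)), (1:Int)).2) 0 (-1) = [1] from by decide]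
  simp only [List.foldl_cons, List.foldl_nil]
  unfold QR_step2
  have hget : PySem.List.pyGet? ([] : List (Int × Int × Int)) (-1) = none := by decide
  simp [hget]

-- the main case N ≥ 2
lemma main_ge2 (N : Int) (hN : 2 ≤ N) : Quotient_Range N = Quotient_Range_alt N := by
  have hm := qrM_pos N (by omega)
  have hsq := qrM_sq N (by omega)
  have hT1 := qrT_pos N hN
  have hTm := qrT_le_M N (by omega)
  have hTg := qrT_ge N (by omega)
  have hmN := qrM_le N (by omega)
  have hTdef : qrT N = PySem.Int.floordiv N (qrM N + 1) := rfl
  have h2m : 2 * qrM N ≤ N := by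
    rcases (by omega : qrM N = 1 ∨ 2 ≤ qrM N) with h | h
    · omega
    · nlinarith [hsq.1]
  have hA1 := run1 N (by omega) (qrM N).toNat (N.toNat + 1) 1 [] (by norm_num) (by omega) (by omega)
  have hB := runB1 N hN (qrM N).toNat (N.toNat + 1) 1 [] (by norm_num) (by omega) (by omega)
  simp only [Quotient_Range, Quotient_Range_alt]
  rw [hA1, hB]
  simp only [List.nil_append]
  rw [qrSingles_split N (by omega)]
  set Y := qrSingles N ((qrM N).toNat - 1) 1 with hY
  set e : Int × Int × Int := (PySem.Int.floordiv N (qrM N), qrM N, qrM N) with hE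
  have he2 : e.2.1 = qrM N := rfl
  rw [pyRange_desc (qrM N + 1) (by omega)]
  rw [qrDesc_cons (qrM N + 1) (by omega)]
  rw [show qrM N + 1 - 1 = qrM N from by ring]
  simp only [List.foldl_cons]
  have hstep1 : QR_step2 N (Y ++ [e]) (qrM N + 1) = Y ++ [e] := by
    unfold QR_step2
    simp only [PySem.List.pyGet?_neg_one_append_singleton]
    split_ifs with h1 h2
    · exfalso
      rw [he2] at h2
      rw [← hTdef] at h1
      omega
    · rfl
    · rfl
  rw [hstep1]
  rcases eq_or_lt_of_le hTm with hTeq | hTlt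
  · -- T = m: the wide-block phase starts right at t = m
    have hrun := run2 N (by omega) (qrM N).toNat Y e (by omega)
      (by rw [he2, show ((((qrM N).toNat) : Int) + 1) = qrM N + 1 from by omega, ← hTdef]; omega)
    rw [show ((((qrM N).toNat) : Int)) = qrM N from by omega] at hrun
    rw [hrun, hTeq]
  · -- T = m - 1: one more silent step at t = m
    have hTeq : qrT N = qrM N - 1 := by omega
    rw [qrDesc_cons (qrM N) (by omega)]
    simp only [List.foldl_cons]
    have hstep2 : QR_step2 N (Y ++ [e]) (qrM N) = Y ++ [e] := by
      unfold QR_step2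
      simp only [PySem.List.pyGet?_neg_one_append_singleton]
      have hl : PySem.Int.floordiv N (qrM N + 1) + 1 = qrM N := by rw [← hTdef]; omega
      split_ifs with h1 h2
      · exfalso
        rw [he2] at h2
        omega
      · rfl
      · rfl
    rw [hstep2]
    have hfdm : qrM N ≤ PySem.Int.floordiv N (qrM N) := by
      rw [PySem.Int.le_floordiv_iff_mul_le (by omega)]
      exact hsq.1
    have hrun := run2 N (by omega) (qrM N - 1).toNat Y e (by omega)
      (by rw [he2, show ((((qrM N - 1).toNat) : Int) + 1) = qrM N from by omega]; omega)
    rw [show ((((qrM N - 1).toNat) : Int)) = qrM N - 1 from by omega] at hrun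
    rw [hrun, hTeq]

theorem qr_equiv (N : Int) : Quotient_Range N = Quotient_Range_alt N := by
  rcases (by omega : N ≤ 0 ∨ N = 1 ∨ 2 ≤ N) with h | h | h
  · exact main_nonpos N h
  · subst h; decide
  · exact main_ge2 N h

-- ===== VERDICT (by name: the statement is the Claim_ definition above) =====
theorem Quotient_Range_spec : Claim_equal_Quotient_Range := by
  intro N _
  unfold Spec_Quotient_Range
  exact qr_equiv N
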